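-- pv_equiv track=rewrite | github.com/pypi-data/pypi-mirror-320 | packages/mpvis/mpvis-0.0.1-py3-none-any.whl/mpvis/mpdfg/utils/filters.py | check_soundness
-- ===== SOURCE A (Python) =====
-- def try_to_reach(source, target, skip_path, paths, visited_already):
--     for path in paths:
--         if path != skip_path:
--             if path[0] == source and path[1] == target:
--                 return True
--             elif path[0] == source and path[1] not in visited_already:
--                 visited_already.append(path[1])
--                 if try_to_reach(path[1], target, skip_path, paths, visited_already):
--                     return True
--
--     return False
--
-- def check_soundness(activity, skip_path, remaining_paths, start_activities, end_activities):
--     reached_source = False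
--     for start_activity in start_activities:
--         if start_activity == activity or try_to_reach(start_activity, activity, skip_path, remaining_paths, []):
--             reached_source = True
--
--     if not reached_source:
--         return False
--
--     reached_target = False
--     for end_activity in end_activities:
--         if end_activity == activity or try_to_reach(activity, end_activity, skip_path, remaining_paths, []):
--             reached_target = True
--
--     return reached_target
-- ===== SOURCE B (Python) =====
-- def check_soundness(activity, skip_path, remaining_paths, start_activities, end_activities):
--     adjacency = {}
--     for path in remaining_paths:
--         if path != skip_path:
--             adjacency.setdefault(path[0], []).append(path[1])
--
--     def reach(sources):
--         # every node with a path of at least one edge from some source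
--         seen = set()
--         todo = list(sources)
--         while todo:
--             u = todo.pop(0)
--             for v in adjacency.get(u, []):
--                 if v not in seen:
--                     seen.add(v)
--                     todo.append(v)
--         return seen
--
--     if activity not in start_activities and activity not in reach(start_activities):
--         return False
--     forward = reach([activity])
--     return any(e == activity or e in forward for e in end_activities)
-- ===== Notes on version B (the rewrite author's own statement) =====
-- stated objective: faster
-- what changed: Replaces the per-query recursive DFS that rescans the whole path list at every node (rerun from scratch for every start and every end activity) by one adjacency dict built once plus an iterative worklist reachability computing whole reachable sets in two traversals.
-- outside the precondition, e.g. on check_soundness('x', (), [('q',)], ['s'], []): A returns False, B raises IndexError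
import Mathlib
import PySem

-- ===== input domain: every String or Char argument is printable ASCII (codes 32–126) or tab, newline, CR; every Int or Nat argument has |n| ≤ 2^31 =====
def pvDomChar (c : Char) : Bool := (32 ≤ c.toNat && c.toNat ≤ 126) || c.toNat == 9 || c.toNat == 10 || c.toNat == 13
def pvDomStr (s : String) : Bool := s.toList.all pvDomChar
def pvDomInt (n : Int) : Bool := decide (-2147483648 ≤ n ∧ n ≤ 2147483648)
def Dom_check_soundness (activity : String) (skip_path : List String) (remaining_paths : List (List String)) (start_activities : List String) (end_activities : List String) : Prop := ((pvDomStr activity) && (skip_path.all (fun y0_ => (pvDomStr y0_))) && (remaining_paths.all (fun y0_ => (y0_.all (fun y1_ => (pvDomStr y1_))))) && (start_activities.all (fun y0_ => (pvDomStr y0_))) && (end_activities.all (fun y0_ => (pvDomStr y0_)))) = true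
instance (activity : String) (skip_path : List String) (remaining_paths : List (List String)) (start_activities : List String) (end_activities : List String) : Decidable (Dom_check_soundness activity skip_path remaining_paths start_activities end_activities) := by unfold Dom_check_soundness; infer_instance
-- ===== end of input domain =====

-- B replaces A's per-query recursive DFS (which rescans the whole path list at every
-- visited node, rerun for every start and end activity) by one adjacency dict built once
-- plus an iterative worklist reachability over whole node sets; equal on Pre_ (return value only).

-- ===== PORT A =====
-- Python try_to_reach: the recursion shares one mutated visited list, so the port threads
-- it as state and returns (result, visited).  Python has no fuel; the Nat argument is only
-- a totality guard: `paths.length + 1` always suffices (proved below), so the 0-branch is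
-- never taken on any input.
def tryGo (skip : List String) (paths : List (List String)) (target : String) :
    Nat → String → List String → List (List String) → Bool × List String
  | 0, _, visited, _ => (false, visited)
  | _ + 1, _, visited, [] => (false, visited)
  | fuel + 1, source, visited, p :: ps =>
      if p ≠ skip then
        match PySem.List.pyGet? p 0 with
        | none => (false, visited)        -- Python raises IndexError here (excluded by Pre_)
        | some a =>
          if a = source then
            match PySem.List.pyGet? p 1 with
            | none => (false, visited)    -- Python raises IndexError here (excluded by Pre_)
            | some b =>
              if b = target then (true, visited)
              else if b ∉ visited then
                match tryGo skip paths target fuel b (visited ++ [b]) paths with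
                | (true, v) => (true, v)
                | (false, v) => tryGo skip paths target (fuel + 1) source v ps
              else tryGo skip paths target (fuel + 1) source visited ps
          else tryGo skip paths target (fuel + 1) source visited ps
      else tryGo skip paths target (fuel + 1) source visited ps
  termination_by fuel _ _ rest => (fuel, rest.length)

def try_to_reach (source target : String) (skip_path : List String) (paths : List (List String)) : Bool :=
  (tryGo skip_path paths target (paths.length + 1) source [] paths).1

def check_soundness (activity : String) (skip_path : List String) (remaining_paths : List (List String)) (start_activities : List String) (end_activities : List String) : Bool :=
  let reached_source := start_activities.foldl
    (fun acc s => if s = activity ∨ try_to_reach s activity skip_path remaining_paths = true then true else acc) false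
  if ¬ reached_source = true then false
  else end_activities.foldl
    (fun acc e => if e = activity ∨ try_to_reach activity e skip_path remaining_paths = true then true else acc) false

-- ===== PORT B =====
-- helper used by bfs's termination argument (cited in decreasing_by): number of elements
-- of `univ` not yet seen.
def cnt (univ seen : List String) : Nat :=
  (univ.dedup.filter (fun v => decide (v ∉ seen))).length

theorem cnt_append_lt (univ seen : List String) {b : String} (hu : b ∈ univ) (hb : b ∉ seen) :
    cnt univ (seen ++ [b]) < cnt univ seen := by
  have hsub : List.Sublist (univ.dedup.filter (fun v => decide (v ∉ seen ++ [b])))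
      (univ.dedup.filter (fun v => decide (v ∉ seen))) := by
    apply List.monotone_filter_right
    intro a ha
    simp only [List.mem_append, decide_eq_true_eq] at *
    exact fun hm => ha (Or.inl hm)
  refine Nat.lt_of_le_of_ne hsub.length_le (fun heq => ?_)
  have hEq := hsub.eq_of_length heq
  have hbmem : b ∈ univ.dedup.filter (fun v => decide (v ∉ seen)) := by
    simp [List.mem_filter, List.mem_dedup, hu, hb]
  rw [← hEq] at hbmem
  simp [List.mem_filter] at hbmem

-- inner `for v in adjacency.get(u, [])` loop of B's reach: adds unseen successors to
-- seen and to the end of the worklist.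
def scan (seen : PySem.Set String) (todo : List String) : List String → PySem.Set String × List String
  | [] => (seen, todo)
  | v :: vs => if v ∈ seen then scan seen todo vs else scan (PySem.Set.add seen v) (todo ++ [v]) vs

theorem scan_measure (univ : List String) (seen : PySem.Set String) (todo l : List String)
    (hl : ∀ v ∈ l, v ∈ univ) :
    2 * cnt univ (scan seen todo l).1 + (scan seen todo l).2.length ≤
      2 * cnt univ seen + todo.length := by
  induction l generalizing seen todo with
  | nil => simp [scan]
  | cons v vs ih =>
    by_cases hv : v ∈ seen
    · simpa [scan, hv] using ih seen todo (fun x hx => hl x (List.mem_cons_of_mem _ hx))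
    · have hstep := ih (PySem.Set.add seen v) (todo ++ [v]) (fun x hx => hl x (List.mem_cons_of_mem _ hx))
      have hlt : cnt univ (PySem.Set.add seen v) < cnt univ seen := by
        rw [PySem.Set.add_of_not_mem hv]
        exact cnt_append_lt univ seen (hl v (List.mem_cons_self)) hv
      have hse : scan seen todo (v :: vs) = scan (PySem.Set.add seen v) (todo ++ [v]) vs := by
        simp [scan, hv]
      rw [hse]
      simp only [List.length_append, List.length_cons, List.length_nil] at hstep
      omega

theorem mem_flatten_values {d : PySem.Dict String (List String)} {u v : String}
    (h : v ∈ d.getD u []) : v ∈ d.values.flatten := by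
  rcases hg : d.get? u with _ | l
  · rw [PySem.Dict.getD_of_get?_eq_none d [] hg] at h
    cases h
  · rw [PySem.Dict.getD_of_get?_eq_some d [] hg] at h
    have hi := PySem.Dict.mem_items_of_get?_eq_some d hg
    exact List.mem_flatten.mpr ⟨l, List.mem_map_of_mem hi, h⟩

def buildAdj (skip : List String) (paths : List (List String)) : PySem.Dict String (List String) :=
  paths.foldl (fun d p =>
    if p ≠ skip then
      match PySem.List.pyGet? p 0, PySem.List.pyGet? p 1 with
      | some a, some b => d.modify a [] (fun l => l ++ [b])   -- adjacency.setdefault(p[0], []).append(p[1])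
      | _, _ => d        -- Python raises IndexError here (excluded by Pre_)
    else d) PySem.Dict.empty

def bfs (adj : PySem.Dict String (List String)) : PySem.Set String → List String → PySem.Set String
  | seen, [] => seen
  | seen, u :: todo =>
      let st := scan seen todo (adj.getD u [])
      bfs adj st.1 st.2
  termination_by seen todo => 2 * cnt adj.values.flatten seen + todo.length
  decreasing_by
    have h := scan_measure adj.values.flatten seen todo (adj.getD u [])
      (fun v hv => mem_flatten_values hv)
    simp only [List.length_cons]
    omega

def reachSet (adj : PySem.Dict String (List String)) (sources : List String) : PySem.Set String :=
  bfs adj PySem.Set.empty sources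

def check_soundness_alt (activity : String) (skip_path : List String) (remaining_paths : List (List String)) (start_activities : List String) (end_activities : List String) : Bool :=
  let adj := buildAdj skip_path remaining_paths
  if activity ∉ start_activities ∧ activity ∉ reachSet adj start_activities then false
  else
    let forward := reachSet adj [activity]
    end_activities.any (fun e => decide (e = activity ∨ e ∈ forward))

-- ===== PRECONDITION & SPEC =====
-- Pre_ excludes inputs where some non-skip path has fewer than two entries: A raises
-- IndexError as soon as such a path's head is queried as a source (and on empty paths
-- always), so whether A returns or raises there depends on which nodes the search happens
-- to visit; B raises IndexError on all of them while building the adjacency dict.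
def Pre_check_soundness (activity : String) (skip_path : List String) (remaining_paths : List (List String)) (start_activities : List String) (end_activities : List String) : Prop :=
  ∀ p ∈ remaining_paths, p = skip_path ∨ 2 ≤ p.length
instance (activity : String) (skip_path : List String) (remaining_paths : List (List String)) (start_activities : List String) (end_activities : List String) : Decidable (Pre_check_soundness activity skip_path remaining_paths start_activities end_activities) := by unfold Pre_check_soundness; infer_instance

def pvWitness_check_soundness : String × List String × List (List String) × List String × List String :=
  ("a", ["z"], [["a", "b"], ["b", "c"]], ["a"], ["c"])

def Spec_check_soundness (activity : String) (skip_path : List String) (remaining_paths : List (List String)) (start_activities : List String) (end_activities : List String) (out : Bool) : Prop := out = check_soundness_alt activity skip_path remaining_paths start_activities end_activities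
instance (activity : String) (skip_path : List String) (remaining_paths : List (List String)) (start_activities : List String) (end_activities : List String) (out : Bool) : Decidable (Spec_check_soundness activity skip_path remaining_paths start_activities end_activities out) := by unfold Spec_check_soundness; infer_instance

-- ===== CLAIM (what is proved, stated in full; the proofs are below) =====
def Claim_equal_check_soundness : Prop := ∀ (activity : String) (skip_path : List String) (remaining_paths : List (List String)) (start_activities : List String) (end_activities : List String), Dom_check_soundness activity skip_path remaining_paths start_activities end_activities → Pre_check_soundness activity skip_path remaining_paths start_activities end_activities → Spec_check_soundness activity skip_path remaining_paths start_activities end_activities (check_soundness activity skip_path remaining_paths start_activities end_activities)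

-- ===== LEMMAS AND PROOFS =====

theorem cnt_mono (univ : List String) {seen seen' : List String} (h : ∀ x ∈ seen, x ∈ seen') :
    cnt univ seen' ≤ cnt univ seen := by
  apply List.Sublist.length_le
  apply List.monotone_filter_right
  intro a ha
  simp only [decide_eq_true_eq] at *
  exact fun hm => ha (h a hm)

-- The edge relation both programs traverse: a path p of `rest` that is not the skip path,
-- read as the edge (p[0], p[1]).
def EdgeIn (skip : List String) (rest : List (List String)) (a b : String) : Prop :=
  ∃ p ∈ rest, p ≠ skip ∧ PySem.List.pyGet? p 0 = some a ∧ PySem.List.pyGet? p 1 = some b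

-- second components of the usable edges; every DFS visit appends one of these
def seconds (skip : List String) (paths : List (List String)) : List String :=
  paths.filterMap (fun p => if p = skip then none else PySem.List.pyGet? p 1)

theorem mem_seconds {skip : List String} {paths : List (List String)} {p : List String} {b : String}
    (hp : p ∈ paths) (hns : p ≠ skip) (h1 : PySem.List.pyGet? p 1 = some b) :
    b ∈ seconds skip paths :=
  List.mem_filterMap.mpr ⟨p, hp, by simp [hns, h1]⟩

theorem edgeIn_cons {skip : List String} {p : List String} {ps : List (List String)} {a b : String} :
    EdgeIn skip (p :: ps) a b ↔
      (p ≠ skip ∧ PySem.List.pyGet? p 0 = some a ∧ PySem.List.pyGet? p 1 = some b) ∨ EdgeIn skip ps a b := by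
  constructor
  · rintro ⟨q, hq, hrest⟩
    rcases List.mem_cons.mp hq with h | h
    · exact Or.inl (h ▸ hrest)
    · exact Or.inr ⟨q, h, hrest⟩
  · rintro (⟨h1, h2, h3⟩ | ⟨q, hq, hrest⟩)
    · exact ⟨p, List.mem_cons_self, h1, h2, h3⟩
    · exact ⟨q, List.mem_cons_of_mem _ hq, hrest⟩

-- a non-skip path admitted by Pre_ has both entries
theorem pyGet_two {p : List String} (h : 2 ≤ p.length) :
    PySem.List.pyGet? p 0 ≠ none ∧ PySem.List.pyGet? p 1 ≠ none := by
  match p, h with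
  | a :: b :: t, _ =>
    constructor
    · simp [pysem]
    · simp [pysem]

-- DFS soundness: a `true` answer exhibits an edge path from source to target.
theorem tryGo_true (skip : List String) (paths : List (List String)) (target : String)
    (fuel : Nat) (source : String) (visited : List String) (rest : List (List String)) :
    ∀ V' : List String, (∀ p ∈ rest, p ∈ paths) →
      tryGo skip paths target fuel source visited rest = (true, V') →
      Relation.TransGen (EdgeIn skip paths) source target := by
  induction fuel, source, visited, rest using tryGo.induct skip paths target with
  | case1 => intro V' _ h; simp [tryGo] at h
  | case2 => intro V' _ h; simp [tryGo] at h
  | case3 fuel source visited p ps hns hg0 =>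
    intro V' _ h; simp [tryGo, hns, hg0] at h
  | case4 fuel visited p ps hns a hg0 hg1 =>
    intro V' _ h; simp [tryGo, hns, hg0, hg1] at h
  | case5 fuel visited p ps hns a hg0 hg1 =>
    intro V' hsub _
    exact Relation.TransGen.single ⟨p, hsub p List.mem_cons_self, hns, hg0, hg1⟩
  | case6 fuel visited p ps hns a hg0 b hg1 hbt hbv v hdeep ih =>
    intro V' hsub _
    exact Relation.TransGen.head ⟨p, hsub p List.mem_cons_self, hns, hg0, hg1⟩
      (ih v (fun q hq => hq) hdeep)
  | case7 fuel visited p ps hns a hg0 b hg1 hbt hbv v hdeep ih1 ih2 =>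
    intro V' hsub h
    rw [tryGo] at h
    simp only [hns, hg0, hg1, hbt, hbv, if_neg, if_true, ne_eq, not_false_eq_true, ite_true,
      ite_false, not_true_eq_false] at h
    rw [hdeep] at h
    exact ih2 V' (fun q hq => hsub q (List.mem_cons_of_mem _ hq)) h
  | case8 fuel visited p ps hns a hg0 b hg1 hbt hbv ih =>
    intro V' hsub h
    rw [tryGo] at h
    simp only [hns, hg0, hg1, hbt, hbv, ne_eq, not_false_eq_true, ite_true, ite_false,
      not_true_eq_false] at h
    exact ih V' (fun q hq => hsub q (List.mem_cons_of_mem _ hq)) h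
  | case9 fuel source visited p ps hns a hg0 has ih =>
    intro V' hsub h
    rw [tryGo] at h
    simp only [hns, hg0, has, ne_eq, not_false_eq_true, ite_true, ite_false] at h
    exact ih V' (fun q hq => hsub q (List.mem_cons_of_mem _ hq)) h
  | case10 fuel source visited p ps hns ih =>
    intro V' hsub h
    rw [tryGo] at h
    simp only [hns, ite_false, not_false_eq_true, ite_true] at h
    exact ih V' (fun q hq => hsub q (List.mem_cons_of_mem _ hq)) h

-- DFS closure: a `false` answer returns a visited list closed under the edge relation
-- and avoiding the target.
theorem tryGo_false (skip : List String) (paths : List (List String)) (target : String)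
    (HP : ∀ p ∈ paths, p = skip ∨ 2 ≤ p.length)
    (fuel : Nat) (source : String) (visited : List String) (rest : List (List String)) :
    ∀ V' : List String, (∀ p ∈ rest, p ∈ paths) →
      cnt (seconds skip paths) visited < fuel →
      tryGo skip paths target fuel source visited rest = (false, V') →
      (∀ x ∈ visited, x ∈ V') ∧
      (∀ b, EdgeIn skip rest source b → b ≠ target ∧ b ∈ V') ∧
      (∀ x, x ∈ V' → x ∉ visited → ∀ b, EdgeIn skip paths x b → b ≠ target ∧ b ∈ V') := by
  induction fuel, source, visited, rest using tryGo.induct skip paths target with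
  | case1 => intro V' _ hcnt _; omega
  | case2 n source visited =>
    intro V' _ _ h
    simp only [tryGo, Prod.mk.injEq] at h
    refine ⟨fun x hx => h.2 ▸ hx, ?_, ?_⟩
    · rintro b ⟨p, hp, _⟩; cases hp
    · intro x hx hxv
      rw [← h.2] at hx; exact absurd hx hxv
  | case3 fuel source visited p ps hns hg0 =>
    intro V' hsub _ _
    rcases HP p (hsub p List.mem_cons_self) with h | h
    · exact absurd h hns
    · exact ((pyGet_two h).1 hg0).elim
  | case4 fuel visited p ps hns a hg0 hg1 =>
    intro V' hsub _ _
    rcases HP p (hsub p List.mem_cons_self) with h | h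
    · exact absurd h hns
    · exact ((pyGet_two h).2 hg1).elim
  | case5 fuel visited p ps hns a hg0 hg1 =>
    intro V' _ _ h
    rw [tryGo] at h
    simp [hns, hg0, hg1] at h
  | case6 fuel visited p ps hns a hg0 b hg1 hbt hbv v hdeep ih =>
    intro V' _ _ h
    rw [tryGo] at h
    simp only [hns, hg0, hg1, hbt, hbv, ne_eq, not_false_eq_true, ite_true, ite_false,
      not_true_eq_false] at h
    rw [hdeep] at h
    cases h
  | case7 fuel visited p ps hns a hg0 b hg1 hbt hbv v hdeep ih1 ih2 =>
    intro V' hsub hcnt h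
    rw [tryGo] at h
    simp only [hns, hg0, hg1, hbt, hbv, ne_eq, not_false_eq_true, ite_true, ite_false,
      not_true_eq_false] at h
    rw [hdeep] at h
    have hpmem : p ∈ paths := hsub p List.mem_cons_self
    have hbsec : b ∈ seconds skip paths := mem_seconds hpmem hns hg1
    have hlt : cnt (seconds skip paths) (visited ++ [b]) < fuel := by
      have := cnt_append_lt (seconds skip paths) visited hbsec hbv
      omega
    obtain ⟨m1, c1, c2⟩ := ih1 v (fun q hq => hq) hlt hdeep
    have hv1 : ∀ x ∈ visited, x ∈ v := fun x hx => m1 x (List.mem_append_left _ hx)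
    have hcnt2 : cnt (seconds skip paths) v < fuel + 1 := by
      have := cnt_mono (seconds skip paths) hv1
      omega
    obtain ⟨m2, d1, d2⟩ := ih2 V' (fun q hq => hsub q (List.mem_cons_of_mem _ hq)) hcnt2 h
    have hvV : ∀ x ∈ v, x ∈ V' := m2
    refine ⟨fun x hx => hvV x (hv1 x hx), ?_, ?_⟩
    · intro b0 hb0
      rcases edgeIn_cons.mp hb0 with ⟨_, he0, he1⟩ | he
      · have hb0b : b0 = b := by rw [hg1] at he1; exact (Option.some.inj he1).symm
        rw [hb0b]
        exact ⟨hbt, hvV b (m1 b (List.mem_append_right _ List.mem_cons_self))⟩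
      · exact d1 b0 he
    · intro x hx hxv b0 hb0
      by_cases hxin : x ∈ v
      · by_cases hxb : x = b
        · subst hxb
          obtain ⟨ht, hm⟩ := c1 b0 hb0
          exact ⟨ht, hvV b0 hm⟩
        · have hxnot : x ∉ visited ++ [b] := by
            simp only [List.mem_append, List.mem_cons, List.not_mem_nil, or_false]
            tauto
          obtain ⟨ht, hm⟩ := c2 x hxin hxnot b0 hb0
          exact ⟨ht, hvV b0 hm⟩
      · exact d2 x hx hxin b0 hb0
  | case8 fuel visited p ps hns a hg0 b hg1 hbt hbv ih =>
    intro V' hsub hcnt h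
    rw [tryGo] at h
    simp only [hns, hg0, hg1, hbt, hbv, ne_eq, not_false_eq_true, ite_true, ite_false,
      not_true_eq_false] at h
    obtain ⟨m1, d1, d2⟩ := ih V' (fun q hq => hsub q (List.mem_cons_of_mem _ hq)) hcnt h
    refine ⟨m1, ?_, d2⟩
    intro b0 hb0
    rcases edgeIn_cons.mp hb0 with ⟨_, he0, he1⟩ | he
    · have hb0b : b0 = b := by rw [hg1] at he1; exact (Option.some.inj he1).symm
      rw [hb0b]
      have hbv' : b ∈ visited := by
        by_contra hc; exact hbv hc
      exact ⟨hbt, m1 b hbv'⟩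
    · exact d1 b0 he
  | case9 fuel source visited p ps hns a hg0 has ih =>
    intro V' hsub hcnt h
    rw [tryGo] at h
    simp only [hns, hg0, has, ne_eq, not_false_eq_true, ite_true, ite_false] at h
    obtain ⟨m1, d1, d2⟩ := ih V' (fun q hq => hsub q (List.mem_cons_of_mem _ hq)) hcnt h
    refine ⟨m1, ?_, d2⟩
    intro b0 hb0
    rcases edgeIn_cons.mp hb0 with ⟨_, he0, _⟩ | he
    · rw [hg0] at he0; exact absurd (Option.some.inj he0) has
    · exact d1 b0 he
  | case10 fuel source visited p ps hns ih =>
    intro V' hsub hcnt h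
    rw [tryGo] at h
    simp only [hns, ite_false, not_false_eq_true, ite_true] at h
    obtain ⟨m1, d1, d2⟩ := ih V' (fun q hq => hsub q (List.mem_cons_of_mem _ hq)) hcnt h
    refine ⟨m1, ?_, d2⟩
    intro b0 hb0
    rcases edgeIn_cons.mp hb0 with ⟨hne, _⟩ | he
    · simp only [ne_eq, not_not] at hns; exact absurd hns hne
    · exact d1 b0 he

-- A's try_to_reach decides existence of a nonempty edge path.
theorem tryReach_iff {skip : List String} {paths : List (List String)}
    (HP : ∀ p ∈ paths, p = skip ∨ 2 ≤ p.length) (source target : String) :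
    try_to_reach source target skip paths = true ↔
      Relation.TransGen (EdgeIn skip paths) source target := by
  constructor
  · intro h
    unfold try_to_reach at h
    rcases hg : tryGo skip paths target (paths.length + 1) source [] paths with ⟨res, V'⟩
    rw [hg] at h
    cases res
    · cases h
    · exact tryGo_true skip paths target _ source [] paths V' (fun p hp => hp) hg
  · intro hreach
    unfold try_to_reach
    rcases hg : tryGo skip paths target (paths.length + 1) source [] paths with ⟨res, V'⟩
    cases res
    · exfalso
      have hcnt : cnt (seconds skip paths) [] < paths.length + 1 := by
        have h1 : cnt (seconds skip paths) [] ≤ (seconds skip paths).dedup.length :=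
          (List.filter_sublist (l := (seconds skip paths).dedup)).length_le
        have h2 : (seconds skip paths).dedup.length ≤ (seconds skip paths).length :=
          (List.dedup_sublist _).length_le
        have h3 : (seconds skip paths).length ≤ paths.length := List.length_filterMap_le _ _
        omega
      obtain ⟨_, d1, d2⟩ := tryGo_false skip paths target HP _ source [] paths V'
        (fun p hp => hp) hcnt hg
      have key : ∀ t, Relation.TransGen (EdgeIn skip paths) source t → t ∈ V' ∧ t ≠ target := by
        intro t ht
        induction ht with
        | single h => exact ⟨(d1 _ h).2, (d1 _ h).1⟩
        | tail h1 h2 ih =>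
          obtain ⟨hm, _⟩ := ih
          obtain ⟨ht2, hm2⟩ := d2 _ hm (List.not_mem_nil) _ h2
          exact ⟨hm2, ht2⟩
      exact (key target hreach).2 rfl
    · rfl

-- ===== B-side lemmas =====

def bstep (adj : PySem.Dict String (List String)) (a b : String) : Prop := b ∈ adj.getD a []

theorem scan_fst_mem :
    ∀ (l : List String) (seen : PySem.Set String) (todo : List String) (x : String),
      x ∈ (scan seen todo l).1 ↔ x ∈ seen ∨ x ∈ l := by
  intro l
  induction l with
  | nil => intro seen todo x; simp [scan]
  | cons v vs ih =>
    intro seen todo x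
    by_cases hv : v ∈ seen
    · rw [show scan seen todo (v :: vs) = scan seen todo vs from by simp [scan, hv]]
      rw [ih]
      simp only [List.mem_cons]
      constructor
      · rintro (h | h)
        · exact Or.inl h
        · exact Or.inr (Or.inr h)
      · rintro (h | h | h)
        · exact Or.inl h
        · exact Or.inl (by rw [h]; exact hv)
        · exact Or.inr h
    · rw [show scan seen todo (v :: vs) = scan (PySem.Set.add seen v) (todo ++ [v]) vs from by
        simp [scan, hv]]
      rw [ih]
      simp only [PySem.Set.mem_add, List.mem_cons]
      tauto

theorem scan_snd_mem :
    ∀ (l : List String) (seen : PySem.Set String) (todo : List String) (x : String),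
      x ∈ (scan seen todo l).2 → x ∈ todo ∨ x ∈ l := by
  intro l
  induction l with
  | nil => intro seen todo x h; exact Or.inl (by simpa [scan] using h)
  | cons v vs ih =>
    intro seen todo x h
    by_cases hv : v ∈ seen
    · rw [show scan seen todo (v :: vs) = scan seen todo vs from by simp [scan, hv]] at h
      rcases ih seen todo x h with h1 | h1
      · exact Or.inl h1
      · exact Or.inr (List.mem_cons_of_mem _ h1)
    · rw [show scan seen todo (v :: vs) = scan (PySem.Set.add seen v) (todo ++ [v]) vs from by
        simp [scan, hv]] at h
      rcases ih _ _ x h with h1 | h1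
      · rcases List.mem_append.mp h1 with h2 | h2
        · exact Or.inl h2
        · simp only [List.mem_cons, List.not_mem_nil, or_false] at h2
          exact Or.inr (by rw [h2]; exact List.mem_cons_self)
      · exact Or.inr (List.mem_cons_of_mem _ h1)

theorem scan_todo_sub :
    ∀ (l : List String) (seen : PySem.Set String) (todo : List String) (x : String),
      x ∈ todo → x ∈ (scan seen todo l).2 := by
  intro l
  induction l with
  | nil => intro seen todo x h; simpa [scan] using h
  | cons v vs ih =>
    intro seen todo x h
    by_cases hv : v ∈ seen
    · rw [show scan seen todo (v :: vs) = scan seen todo vs from by simp [scan, hv]]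
      exact ih seen todo x h
    · rw [show scan seen todo (v :: vs) = scan (PySem.Set.add seen v) (todo ++ [v]) vs from by
        simp [scan, hv]]
      exact ih _ _ x (List.mem_append_left _ h)

theorem scan_new_sub :
    ∀ (l : List String) (seen : PySem.Set String) (todo : List String) (x : String),
      x ∈ (scan seen todo l).1 → x ∈ seen ∨ x ∈ (scan seen todo l).2 := by
  intro l
  induction l with
  | nil => intro seen todo x h; exact Or.inl (by simpa [scan] using h)
  | cons v vs ih =>
    intro seen todo x h
    by_cases hv : v ∈ seen
    · rw [show scan seen todo (v :: vs) = scan seen todo vs from by simp [scan, hv]] at h ⊢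
      exact ih seen todo x h
    · rw [show scan seen todo (v :: vs) = scan (PySem.Set.add seen v) (todo ++ [v]) vs from by
        simp [scan, hv]] at h ⊢
      rcases ih _ _ x h with h1 | h1
      · rcases (PySem.Set.mem_add seen v x).mp h1 with h2 | h2
        · exact Or.inl h2
        · exact Or.inr (scan_todo_sub vs _ _ x
            (List.mem_append_right _ (by rw [h2]; exact List.mem_cons_self)))
      · exact Or.inr h1

theorem bfs_sound (adj : PySem.Dict String (List String)) (x : String) :
    ∀ (seen : PySem.Set String) (todo : List String), x ∈ bfs adj seen todo →
      x ∈ seen ∨ ∃ u ∈ todo, Relation.TransGen (bstep adj) u x := by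
  intro seen todo
  induction seen, todo using bfs.induct adj with
  | case1 seen => intro h; exact Or.inl (by simpa [bfs] using h)
  | case2 seen u todo st ih =>
    intro h
    rw [show bfs adj seen (u :: todo)
        = bfs adj (scan seen todo (adj.getD u [])).1 (scan seen todo (adj.getD u [])).2 from by
      rw [bfs]] at h
    rcases ih h with hseen | ⟨w, hw, htg⟩
    · rcases (scan_fst_mem _ _ _ x).mp hseen with h1 | h1
      · exact Or.inl h1
      · exact Or.inr ⟨u, List.mem_cons_self, Relation.TransGen.single h1⟩
    · rcases scan_snd_mem _ _ _ w hw with h1 | h1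
      · exact Or.inr ⟨w, List.mem_cons_of_mem _ h1, htg⟩
      · exact Or.inr ⟨u, List.mem_cons_self, Relation.TransGen.head h1 htg⟩

theorem bfs_complete (adj : PySem.Dict String (List String)) :
    ∀ (seen : PySem.Set String) (todo : List String),
      (∀ a ∈ seen, a ∈ todo ∨ ∀ v ∈ adj.getD a [], v ∈ seen) →
      (∀ a ∈ seen, a ∈ bfs adj seen todo) ∧
      (∀ a ∈ bfs adj seen todo, ∀ v ∈ adj.getD a [], v ∈ bfs adj seen todo) ∧
      (∀ u ∈ todo, ∀ v ∈ adj.getD u [], v ∈ bfs adj seen todo) := by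
  intro seen todo
  induction seen, todo using bfs.induct adj with
  | case1 seen =>
    intro hInv
    refine ⟨fun a ha => by simpa [bfs] using ha, ?_, fun u hu => absurd hu List.not_mem_nil⟩
    intro a ha v hv
    rw [show bfs adj seen [] = seen from by rw [bfs]] at ha ⊢
    rcases hInv a ha with h | h
    · exact absurd h List.not_mem_nil
    · exact h v hv
  | case2 seen u todo st ih =>
    intro hInv
    have hsub1 : ∀ a ∈ seen, a ∈ (scan seen todo (adj.getD u [])).1 :=
      fun a ha => (scan_fst_mem _ _ _ a).mpr (Or.inl ha)
    have hsucc_u : ∀ v ∈ adj.getD u [], v ∈ (scan seen todo (adj.getD u [])).1 :=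
      fun v hv => (scan_fst_mem _ _ _ v).mpr (Or.inr hv)
    have hInv' : ∀ a ∈ (scan seen todo (adj.getD u [])).1,
        a ∈ (scan seen todo (adj.getD u [])).2 ∨
          ∀ v ∈ adj.getD a [], v ∈ (scan seen todo (adj.getD u [])).1 := by
      intro a ha
      rcases scan_new_sub _ _ _ a ha with hs | ht
      · rcases hInv a hs with hin | hcl
        · rcases List.mem_cons.mp hin with h | h
          · exact Or.inr (by rw [h]; exact hsucc_u)
          · exact Or.inl (scan_todo_sub _ _ _ a h)
        · exact Or.inr fun v hv => hsub1 v (hcl v hv)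
      · exact Or.inl ht
    obtain ⟨p1, p2, p3⟩ := ih hInv'
    have hbfs : bfs adj seen (u :: todo)
        = bfs adj (scan seen todo (adj.getD u [])).1 (scan seen todo (adj.getD u [])).2 := by
      rw [bfs]
    rw [hbfs]
    refine ⟨fun a ha => p1 a (hsub1 a ha), p2, ?_⟩
    intro w hw v hv
    rcases List.mem_cons.mp hw with h | h
    · exact p1 v (by rw [h] at hv; exact hsucc_u v hv)
    · exact p3 w (scan_todo_sub _ _ _ w h) v hv

theorem reach_iff (adj : PySem.Dict String (List String)) (sources : List String) (x : String) :
    x ∈ reachSet adj sources ↔ ∃ s ∈ sources, Relation.TransGen (bstep adj) s x := by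
  constructor
  · intro h
    rcases bfs_sound adj x PySem.Set.empty sources h with h0 | h0
    · exact absurd h0 List.not_mem_nil
    · exact h0
  · rintro ⟨s0, hs0, htg⟩
    obtain ⟨p1, p2, p3⟩ := bfs_complete adj PySem.Set.empty sources
      (fun a ha => absurd ha List.not_mem_nil)
    induction htg with
    | single h => exact p3 s0 hs0 _ h
    | tail h1 h2 ih => exact p2 _ ih _ h2

def outEdges (skip : List String) (a : String) (paths : List (List String)) : List String :=
  paths.filterMap (fun p => if p = skip then none else
    match PySem.List.pyGet? p 0, PySem.List.pyGet? p 1 with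
    | some a', some b => if a' = a then some b else none
    | _, _ => none)

theorem buildAdj_getD (skip : List String) (a : String) :
    ∀ (paths : List (List String)) (d : PySem.Dict String (List String)),
      (paths.foldl (fun d p =>
        if p ≠ skip then
          match PySem.List.pyGet? p 0, PySem.List.pyGet? p 1 with
          | some x, some y => d.modify x [] (fun l => l ++ [y])
          | _, _ => d
        else d) d).getD a [] = d.getD a [] ++ outEdges skip a paths := by
  intro paths
  induction paths with
  | nil => intro d; simp [outEdges]
  | cons p ps ih =>
    intro d
    simp only [List.foldl_cons]
    by_cases hskip : p = skip
    · simp only [hskip, ne_eq, not_true_eq_false, ite_false]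
      rw [ih d]
      simp [outEdges, hskip]
    · rcases hg0 : PySem.List.pyGet? p 0 with _ | x <;>
        rcases hg1 : PySem.List.pyGet? p 1 with _ | y <;>
        simp only [hg0, hg1, hskip, ne_eq, not_false_eq_true, ite_true] <;>
        rw [ih] <;>
        simp only [outEdges, List.filterMap_cons, hskip, ite_false, if_neg, not_false_eq_true,
          hg0, hg1]
      · rw [PySem.Dict.getD_modify]
        by_cases hxa : a = x
        · subst hxa
          simp [List.append_assoc]
        · have hxa2 : ¬ x = a := fun h => hxa h.symm
          simp [hxa, hxa2]

theorem mem_adj_iff (skip : List String) (paths : List (List String)) (a b : String) :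
    bstep (buildAdj skip paths) a b ↔ EdgeIn skip paths a b := by
  unfold bstep buildAdj
  rw [buildAdj_getD, PySem.Dict.getD_empty, List.nil_append]
  unfold outEdges EdgeIn
  rw [List.mem_filterMap]
  constructor
  · rintro ⟨p, hp, hf⟩
    by_cases hskip : p = skip
    · rw [if_pos hskip] at hf; cases hf
    · rw [if_neg hskip] at hf
      rcases hg0 : PySem.List.pyGet? p 0 with _ | x <;> rw [hg0] at hf
      · cases hf
      · rcases hg1 : PySem.List.pyGet? p 1 with _ | y <;> rw [hg1] at hf
        · cases hf
        · simp only [] at hf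
          by_cases hxa : x = a
          · rw [if_pos hxa] at hf
            exact ⟨p, hp, hskip, by rw [hg0, hxa], by rw [hg1, Option.some.inj hf]⟩
          · rw [if_neg hxa] at hf; cases hf
  · rintro ⟨p, hp, hskip, hg0, hg1⟩
    refine ⟨p, hp, ?_⟩
    rw [if_neg hskip, hg0, hg1]
    simp

theorem transGen_congr {r s : String → String → Prop} (h : ∀ a b, r a b ↔ s a b) (a b : String) :
    Relation.TransGen r a b ↔ Relation.TransGen s a b :=
  ⟨Relation.TransGen.mono (fun x y => (h x y).1), Relation.TransGen.mono (fun x y => (h x y).2)⟩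

theorem foldl_ite_any (P : String → Prop) [DecidablePred P] :
    ∀ (l : List String) (acc : Bool),
      l.foldl (fun acc x => if P x then true else acc) acc = (acc || l.any (fun x => decide (P x))) := by
  intro l
  induction l with
  | nil => intro acc; simp
  | cons v vs ih =>
    intro acc
    rw [List.foldl_cons]
    by_cases h : P v
    · rw [if_pos h, ih true]
      simp [h]
    · rw [if_neg h, ih acc]
      simp [h]

theorem check_soundness_spec : Claim_equal_check_soundness := by
  intro activity skip paths starts ends _hdom hpre
  have HP : ∀ p ∈ paths, p = skip ∨ 2 ≤ p.length := hpre
  have htr : ∀ s t, try_to_reach s t skip paths = true ↔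
      Relation.TransGen (EdgeIn skip paths) s t := fun s t => tryReach_iff HP s t
  have hstep : ∀ a b, Relation.TransGen (bstep (buildAdj skip paths)) a b ↔
      Relation.TransGen (EdgeIn skip paths) a b :=
    transGen_congr (mem_adj_iff skip paths)
  -- characterize A
  have h1 : ∀ t, (starts.any fun s => decide (s = t ∨ try_to_reach s t skip paths = true)) = true ↔
      (∃ s ∈ starts, s = t ∨ Relation.TransGen (EdgeIn skip paths) s t) := by
    intro t
    simp only [List.any_eq_true, decide_eq_true_eq, htr]
  have h2 : (ends.any fun e => decide (e = activity ∨ try_to_reach activity e skip paths = true)) = true ↔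
      (∃ e ∈ ends, e = activity ∨ Relation.TransGen (EdgeIn skip paths) activity e) := by
    simp only [List.any_eq_true, decide_eq_true_eq, htr]
  have hA : check_soundness activity skip paths starts ends = true ↔
      ((∃ s ∈ starts, s = activity ∨ Relation.TransGen (EdgeIn skip paths) s activity) ∧
       (∃ e ∈ ends, e = activity ∨ Relation.TransGen (EdgeIn skip paths) activity e)) := by
    unfold check_soundness
    rw [foldl_ite_any, foldl_ite_any]
    simp only [Bool.false_or]
    rcases hc : (starts.any fun s => decide (s = activity ∨ try_to_reach s activity skip paths = true)) with _ | _
    · rw [if_pos (by exact Bool.false_ne_true)]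
      constructor
      · intro h; cases h
      · rintro ⟨hS, _⟩
        rw [(h1 activity).mpr hS] at hc
        cases hc
    · rw [if_neg (by exact fun h => h rfl)]
      rw [h2]
      constructor
      · intro h; exact ⟨(h1 activity).mp hc, h⟩
      · rintro ⟨_, h⟩; exact h
  -- characterize B
  have hfwd : ∀ e, e ∈ reachSet (buildAdj skip paths) [activity] ↔
      Relation.TransGen (bstep (buildAdj skip paths)) activity e := by
    intro e
    rw [reach_iff]
    constructor
    · rintro ⟨s, hs, h⟩
      rcases List.mem_cons.mp hs with h1 | h1
      · rw [← h1]; exact h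
      · cases h1
    · intro h; exact ⟨activity, List.mem_cons_self, h⟩
  have hB : check_soundness_alt activity skip paths starts ends = true ↔
      ((activity ∈ starts ∨
        ∃ s ∈ starts, Relation.TransGen (bstep (buildAdj skip paths)) s activity) ∧
       (∃ e ∈ ends, e = activity ∨
        Relation.TransGen (bstep (buildAdj skip paths)) activity e)) := by
    unfold check_soundness_alt
    by_cases hc : activity ∉ starts ∧ activity ∉ reachSet (buildAdj skip paths) starts
    · rw [if_pos hc]
      constructor
      · intro h; cases h
      · rintro ⟨hS, _⟩
        rcases hS with h | h
        · exact absurd h hc.1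
        · exact absurd ((reach_iff _ starts activity).mpr h) hc.2
    · rw [if_neg hc]
      push_neg at hc
      constructor
      · intro h
        refine ⟨?_, ?_⟩
        · by_cases hm : activity ∈ starts
          · exact Or.inl hm
          · exact Or.inr ((reach_iff _ starts activity).mp (hc hm))
        · obtain ⟨e, he, hor⟩ := List.any_eq_true.mp h
          rw [decide_eq_true_eq] at hor
          rcases hor with h1 | h1
          · exact ⟨e, he, Or.inl h1⟩
          · exact ⟨e, he, Or.inr ((hfwd e).mp h1)⟩
      · rintro ⟨_, e, he, hor⟩
        refine List.any_eq_true.mpr ⟨e, he, ?_⟩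
        rw [decide_eq_true_eq]
        rcases hor with h1 | h1
        · exact Or.inl h1
        · exact Or.inr ((hfwd e).mpr h1)
  -- combine
  unfold Spec_check_soundness
  rw [Bool.eq_iff_iff, hA, hB]
  have hsplit : (∃ s ∈ starts, s = activity ∨ Relation.TransGen (EdgeIn skip paths) s activity) ↔
      (activity ∈ starts ∨ ∃ s ∈ starts, Relation.TransGen (EdgeIn skip paths) s activity) := by
    constructor
    · rintro ⟨s, hs, h | h⟩
      · exact Or.inl (by rw [← h]; exact hs)
      · exact Or.inr ⟨s, hs, h⟩
    · rintro (h | ⟨s, hs, h⟩)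
      · exact ⟨activity, h, Or.inl rfl⟩
      · exact ⟨s, hs, Or.inr h⟩
  simp only [hstep, hsplit]
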